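-- pv_equiv track=rewrite | github.com/fernandoim/sequence | secuence.py | pair_equal
-- ===== SOURCE A (Python) =====
-- def pair_equal(amount=100, start=0, stop=100, truncated=True):
--     """
--     Returns a dictionary in which the values of each pair are equal.
--     """
--     sequence = []
--     amount = amount + start
--
--
--     for x in range(start, amount):
--         if truncated and x >= stop:
--             sequence.append(stop)
--         else:
--             sequence.append(x)
--
--     return sequence
-- ===== SOURCE B (Python) =====
-- def pair_equal(amount=100, start=0, stop=100, truncated=True):
--     end = start + amount
--     if not truncated:
--         return list(range(start, end))
--     prefix = list(range(start, min(end, stop)))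
--     count = max(0, end - max(start, stop))
--     return prefix + [stop] * count
-- ===== Notes on version B (the rewrite author's own statement) =====
-- stated objective: simpler
-- what changed: Replaces the per-element clamp branch inside the loop by a split-at-threshold decomposition: one plain range for the unclamped prefix plus a replicated [stop]*count tail, with closed-form count.
import Mathlib
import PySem

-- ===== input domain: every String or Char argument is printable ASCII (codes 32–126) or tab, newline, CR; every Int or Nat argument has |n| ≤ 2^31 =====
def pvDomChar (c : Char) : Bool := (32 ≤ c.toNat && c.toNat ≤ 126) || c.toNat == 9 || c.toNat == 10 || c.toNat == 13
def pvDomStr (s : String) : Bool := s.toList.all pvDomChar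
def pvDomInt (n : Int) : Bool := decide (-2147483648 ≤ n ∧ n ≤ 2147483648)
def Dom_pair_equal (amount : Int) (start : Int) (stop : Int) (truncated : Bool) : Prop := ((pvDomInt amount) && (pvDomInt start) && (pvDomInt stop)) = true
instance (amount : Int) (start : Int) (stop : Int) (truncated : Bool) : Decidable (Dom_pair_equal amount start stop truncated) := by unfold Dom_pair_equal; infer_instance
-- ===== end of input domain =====

-- B replaces A's per-element clamp branch by a split-at-threshold decomposition (range prefix + replicated tail); objective: simpler.


-- ===== PORT A =====
def pair_equal (amount : Int) (start : Int) (stop : Int) (truncated : Bool) : List Int :=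
  let amount' := amount + start
  (PySem.List.pyRange start amount' 1).foldl
    (fun sequence x => if truncated && decide (stop ≤ x) then sequence ++ [stop] else sequence ++ [x]) []

-- ===== PORT B =====
def pair_equal_alt (amount : Int) (start : Int) (stop : Int) (truncated : Bool) : List Int :=
  let e := start + amount
  if !truncated then PySem.List.pyRange start e 1
  else
    let pre := PySem.List.pyRange start (min e stop) 1
    let count := max 0 (e - max start stop)
    pre ++ List.replicate count.toNat stop

-- ===== PRECONDITION & SPEC =====
def Spec_pair_equal (amount : Int) (start : Int) (stop : Int) (truncated : Bool) (out : List Int) : Prop := out = pair_equal_alt amount start stop truncated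
instance (amount : Int) (start : Int) (stop : Int) (truncated : Bool) (out : List Int) : Decidable (Spec_pair_equal amount start stop truncated out) := by unfold Spec_pair_equal; infer_instance

-- ===== CLAIM (what is proved, stated in full; the proofs are below) =====
def Claim_equal_pair_equal : Prop := ∀ (amount : Int) (start : Int) (stop : Int) (truncated : Bool), Dom_pair_equal amount start stop truncated → Spec_pair_equal amount start stop truncated (pair_equal amount start stop truncated)

-- ===== LEMMAS AND PROOFS =====

-- A loop that only appends one element per step is a map.
theorem foldl_append_map (l : List Int) (f : Int → Int) :
    ∀ acc : List Int, l.foldl (fun a x => a ++ [f x]) acc = acc ++ l.map f := by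
  induction l with
  | nil => intro acc; simp
  | cons y ys ih => intro acc; simp [List.foldl, ih]

-- A constant map is a replicate.
theorem map_eq_replicate_of_const (l : List Int) (f : Int → Int) (c : Int)
    (h : ∀ x ∈ l, f x = c) : l.map f = List.replicate l.length c := by
  induction l with
  | nil => simp
  | cons y ys ih =>
      simp only [List.map, List.length_cons, List.replicate_succ]
      rw [h y (by simp), ih (fun x hx => h x (by simp [hx]))]

-- The clamped map over a range splits into an untouched prefix and a replicated tail.
theorem map_clamp_split (start e stop : Int) :
    (PySem.List.pyRange start e 1).map (fun x => if stop ≤ x then stop else x)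
      = PySem.List.pyRange start (min e stop) 1
        ++ List.replicate (max 0 (e - max start stop)).toNat stop := by
  by_cases he : start ≤ e
  · set m : Int := max start (min e stop) with hm
    have h1 : start ≤ m := le_max_left _ _
    have h2 : m ≤ e := by omega
    rw [PySem.List.pyRange_one_append start m e h1 h2, List.map_append]
    have hpre : (PySem.List.pyRange start m 1).map (fun x => if stop ≤ x then stop else x)
        = PySem.List.pyRange start (min e stop) 1 := by
      have hcongr : (PySem.List.pyRange start m 1).map (fun x => if stop ≤ x then stop else x)
          = (PySem.List.pyRange start m 1).map id := by
        apply List.map_congr_left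
        intro x hx
        have hx' := (PySem.List.mem_pyRange_one).1 hx
        have : ¬ stop ≤ x := by omega
        simp [this]
      rw [hcongr, List.map_id]
      by_cases hms : start ≤ min e stop
      · have : m = min e stop := by omega
        rw [this]
      · have hnil1 : PySem.List.pyRange start m 1 = [] := by
          apply PySem.List.pyRange_one_eq_nil; omega
        have hnil2 : PySem.List.pyRange start (min e stop) 1 = [] := by
          apply PySem.List.pyRange_one_eq_nil; omega
        rw [hnil1, hnil2]
    have htail : (PySem.List.pyRange m e 1).map (fun x => if stop ≤ x then stop else x)
        = List.replicate (max 0 (e - max start stop)).toNat stop := by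
      rw [map_eq_replicate_of_const _ _ stop]
      · rw [PySem.List.length_pyRange_one]
        congr 1
        omega
      · intro x hx
        have hx' := (PySem.List.mem_pyRange_one).1 hx
        have : stop ≤ x := by omega
        simp [this]
    rw [hpre, htail]
  · have h1 : PySem.List.pyRange start e 1 = [] := by
      apply PySem.List.pyRange_one_eq_nil; omega
    have h2 : PySem.List.pyRange start (min e stop) 1 = [] := by
      apply PySem.List.pyRange_one_eq_nil; omega
    have h3 : (max 0 (e - max start stop)).toNat = 0 := by omega
    rw [h1, h2, h3]
    simp

-- ===== VERDICT (by name: the statement is the Claim_ definition above) =====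
theorem pair_equal_spec : Claim_equal_pair_equal := by
  intro amount start stop truncated _
  unfold Spec_pair_equal pair_equal pair_equal_alt
  cases truncated with
  | false =>
      simp only [Bool.false_and]
      have : (fun (a : List Int) (x : Int) => if (false : Bool) = true then a ++ [stop] else a ++ [x])
           = (fun a x => a ++ [(fun y => y) x]) := by
        funext a x; simp
      rw [show amount + start = start + amount by ring]
      rw [this, foldl_append_map]
      simp
  | true =>
      simp only [Bool.true_and, Bool.not_true]
      have : (fun (a : List Int) (x : Int) => if decide (stop ≤ x) = true then a ++ [stop] else a ++ [x])
           = (fun a x => a ++ [(fun y => if stop ≤ y then stop else y) x]) := by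
        funext a x
        by_cases h : stop ≤ x <;> simp [h]
      rw [show amount + start = start + amount by ring]
      rw [this, foldl_append_map, map_clamp_split]
      simp
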